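-- pv_equiv track=rewrite | github.com/Jln220/tiburon-gk-knowledgebase | scripts/extract-parts-catalog.py | split_model_desc_from_text
-- ===== SOURCE A (Python) =====
-- MODEL_DESC_KEYWORDS = [
--     "Engine Capacity", "Fuel Type", "Transmission", "Option Codes",
--     "Market", "Emission", "Body Type", "[H]", "[G]", "[+]"
-- ]
--
-- def split_model_desc_from_text(lines):
--     """Split part name lines from model description lines."""
--     name_lines = []
--     model_lines = []
--     in_model = False
--     for line in lines:
--         if any(kw in line for kw in MODEL_DESC_KEYWORDS):
--             in_model = True
--         if in_model:
--             model_lines.append(line)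
--         else:
--             name_lines.append(line)
--     return name_lines, model_lines
-- ===== SOURCE B (Python) =====
-- MODEL_DESC_KEYWORDS = [
--     "Engine Capacity", "Fuel Type", "Transmission", "Option Codes",
--     "Market", "Emission", "Body Type", "[H]", "[G]", "[+]"
-- ]
--
-- def split_model_desc_from_text(lines):
--     """Split part name lines from model description lines."""
--     lines = list(lines)
--     i = next((i for i, line in enumerate(lines)
--               if any(kw in line for kw in MODEL_DESC_KEYWORDS)), len(lines))
--     return lines[:i], lines[i:]
-- ===== Notes on version B (the rewrite author's own statement) =====
-- stated objective: simpler
-- what changed: Replaces the flag-driven accumulation loop with computing the split index (first line containing any keyword, defaulting to len(lines)) and returning two slices.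
import Mathlib
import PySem

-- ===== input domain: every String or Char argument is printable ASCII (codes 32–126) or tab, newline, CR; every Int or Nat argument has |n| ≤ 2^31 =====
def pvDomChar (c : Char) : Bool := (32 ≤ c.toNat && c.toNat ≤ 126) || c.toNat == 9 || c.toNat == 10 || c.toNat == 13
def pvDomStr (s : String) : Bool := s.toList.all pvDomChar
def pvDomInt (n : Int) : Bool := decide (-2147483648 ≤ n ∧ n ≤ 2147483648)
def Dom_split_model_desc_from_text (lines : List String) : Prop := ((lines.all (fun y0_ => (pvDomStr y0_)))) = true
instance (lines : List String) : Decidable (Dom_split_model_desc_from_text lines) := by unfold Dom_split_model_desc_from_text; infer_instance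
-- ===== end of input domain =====

-- B computes the split index (first line containing any keyword, defaulting to the length)
-- and returns two slices instead of A's flag-driven accumulation loop; objective: simpler.

def MODEL_DESC_KEYWORDS : List String :=
  ["Engine Capacity", "Fuel Type", "Transmission", "Option Codes",
   "Market", "Emission", "Body Type", "[H]", "[G]", "[+]"]

-- ===== PORT A =====
-- 'any(kw in line for kw in MODEL_DESC_KEYWORDS)'
def pvHasKw (line : String) : Bool :=
  MODEL_DESC_KEYWORDS.any (fun kw => PySem.Str.isIn kw line)

-- the for-loop of A, with its three pieces of state (name_lines, model_lines, in_model)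
def pvALoop (name_lines model_lines : List String) (in_model : Bool) :
    List String → List String × List String
  | [] => (name_lines, model_lines)
  | line :: rest =>
    let in_model' := if pvHasKw line then true else in_model
    if in_model' then pvALoop name_lines (model_lines ++ [line]) in_model' rest
    else pvALoop (name_lines ++ [line]) model_lines in_model' rest

def split_model_desc_from_text (lines : List String) : List String × List String :=
  pvALoop [] [] false lines

-- ===== PORT B =====
-- i = first index whose line contains a keyword, defaulting to len(lines); return the two slices
def split_model_desc_from_text_alt (lines : List String) : List String × List String :=
  let i := lines.findIdx pvHasKw
  (lines.take i, lines.drop i)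

-- ===== PRECONDITION & SPEC =====
def Spec_split_model_desc_from_text (lines : List String) (out : List String × List String) : Prop := out = split_model_desc_from_text_alt lines
instance (lines : List String) (out : List String × List String) : Decidable (Spec_split_model_desc_from_text lines out) := by unfold Spec_split_model_desc_from_text; infer_instance

-- ===== CLAIM (what is proved, stated in full; the proofs are below) =====
def Claim_equal_split_model_desc_from_text : Prop := ∀ (lines : List String), Dom_split_model_desc_from_text lines → Spec_split_model_desc_from_text lines (split_model_desc_from_text lines)

-- ===== LEMMAS AND PROOFS =====

-- once in_model is set, every remaining line is appended to model_lines
theorem pvALoop_true (ls : List String) (name model : List String) :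
    pvALoop name model true ls = (name, model ++ ls) := by
  induction ls generalizing model with
  | nil => simp [pvALoop]
  | cons l rest ih =>
    simp [pvALoop, ih]

-- while in_model is still false, the loop splits at the first keyword line
theorem pvALoop_false (ls : List String) (name model : List String) :
    pvALoop name model false ls =
      (name ++ ls.take (ls.findIdx pvHasKw), model ++ ls.drop (ls.findIdx pvHasKw)) := by
  induction ls generalizing name with
  | nil => simp [pvALoop]
  | cons l rest ih =>
    by_cases h : pvHasKw l
    · simp [pvALoop, h, pvALoop_true, List.findIdx_cons]
    · simp [pvALoop, h, ih, List.findIdx_cons]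

-- ===== VERDICT (by name: the statement is the Claim_ definition above) =====
theorem split_model_desc_from_text_spec : Claim_equal_split_model_desc_from_text := by
  intro lines _
  unfold Spec_split_model_desc_from_text split_model_desc_from_text split_model_desc_from_text_alt
  simp [pvALoop_false]
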